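-- pv_equiv track=rewrite | github.com/BoatingZeng/my-cws | tf_cws/tagger.py | get_new_chars
-- ===== SOURCE A (Python) =====
-- def get_new_chars(lines, char2idx):
--     new_chars = set()
--     for line in lines:
--         line = line.strip()
--         for ch in line:
--             if ch not in char2idx:
--                 new_chars.add(ch)
--     return new_chars
-- ===== SOURCE B (Python) =====
-- def get_new_chars(lines, char2idx):
--     vocab = set(char2idx)
--
--     def unknown(lo, hi):
--         # characters of lines[lo:hi] that are outside the vocabulary
--         if hi - lo <= 1:
--             return set(lines[lo].strip()) - vocab if lo < hi else set()
--         mid = (lo + hi) // 2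
--         return unknown(lo, mid) | unknown(mid, hi)
--
--     return unknown(0, len(lines))
-- ===== Notes on version B (the rewrite author's own statement) =====
-- stated objective: alternative
-- what changed: B replaces the flat nested loop with inline membership tests by a recursive divide-and-conquer over the line range: each leaf computes set(line.strip()) - vocab by bulk set difference and results are combined with set unions.
import Mathlib
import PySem

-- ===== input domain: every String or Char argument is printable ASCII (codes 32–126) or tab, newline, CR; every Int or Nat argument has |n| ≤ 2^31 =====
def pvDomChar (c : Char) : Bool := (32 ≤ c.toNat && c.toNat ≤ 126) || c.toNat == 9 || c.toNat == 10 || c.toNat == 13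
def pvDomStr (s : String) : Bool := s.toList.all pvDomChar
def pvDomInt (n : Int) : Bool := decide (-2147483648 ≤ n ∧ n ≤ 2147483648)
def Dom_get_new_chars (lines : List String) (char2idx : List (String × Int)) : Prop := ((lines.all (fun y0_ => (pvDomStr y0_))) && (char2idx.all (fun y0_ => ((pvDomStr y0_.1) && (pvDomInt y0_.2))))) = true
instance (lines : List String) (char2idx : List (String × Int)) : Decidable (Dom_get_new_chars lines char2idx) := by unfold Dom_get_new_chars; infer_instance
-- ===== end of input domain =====

-- B recomputes the same set by recursive divide-and-conquer over the line range (per-leaf set difference, combined by unions) instead of A's flat nested loop with an inline membership branch (alternative; same cost).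


-- shared transliteration helper: iterating a Python str yields one-character strings
def pvChars (line : String) : List String :=
  (PySem.Str.strip line).toList.map (fun c => String.ofList [c])

-- ===== PORT A =====
def get_new_chars (lines : List String) (char2idx : List (String × Int)) : List String :=
  lines.foldl
    (fun new_chars line =>
      (pvChars line).foldl
        (fun s ch => if PySem.Dict.contains ⟨char2idx⟩ ch then s else PySem.Set.add s ch)
        new_chars)
    PySem.Set.empty

-- ===== PORT B =====
-- recursive helper unknown(lo, hi); every leaf call keeps lo < hi ≤ lines.length, so getD is exact for lines[lo]
def pvUnknown (lines : List String) (vocab : List String) (lo hi : Nat) : List String :=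
  if hi - lo ≤ 1 then
    if lo < hi then
      PySem.Set.diff (PySem.Set.ofList (pvChars (lines.getD lo ""))) vocab
    else PySem.Set.empty
  else
    PySem.Set.union (pvUnknown lines vocab lo ((lo + hi) / 2)) (pvUnknown lines vocab ((lo + hi) / 2) hi)
termination_by hi - lo
decreasing_by all_goals omega

def get_new_chars_alt (lines : List String) (char2idx : List (String × Int)) : List String :=
  let vocab := PySem.Set.ofList (PySem.Dict.keys ⟨char2idx⟩)
  pvUnknown lines vocab 0 lines.length

-- ===== PRECONDITION & SPEC =====
def Spec_get_new_chars (lines : List String) (char2idx : List (String × Int)) (out : List String) : Prop := out = get_new_chars_alt lines char2idx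
instance (lines : List String) (char2idx : List (String × Int)) (out : List String) : Decidable (Spec_get_new_chars lines char2idx out) := by unfold Spec_get_new_chars; infer_instance

-- ===== CLAIM (what is proved, stated in full; the proofs are below) =====
def Claim_equal_get_new_chars : Prop := ∀ (lines : List String) (char2idx : List (String × Int)), Dom_get_new_chars lines char2idx → Spec_get_new_chars lines char2idx (get_new_chars lines char2idx)

-- ===== LEMMAS AND PROOFS =====
-- proof-only abbreviations
def pvStep (d : List (String × Int)) (s : List String) (ch : String) : List String :=
  if PySem.Dict.contains ⟨d⟩ ch then s else PySem.Set.add s ch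

def pvVocab (d : List (String × Int)) : List String :=
  PySem.Set.ofList (PySem.Dict.keys ⟨d⟩)

theorem pv_add_of_mem {s : List String} {c : String} (h : c ∈ s) : PySem.Set.add s c = s := by
  simp [PySem.Set.add, h]

-- key reassociation law: folding a deduplicating update of u over A = updating (update A u) with the raw list
theorem pv_gen (t : List String) : ∀ (u A : List String),
    PySem.Set.update A (PySem.Set.update u t) = PySem.Set.update (PySem.Set.update A u) t := by
  induction t with
  | nil => intro u A; rfl
  | cons c t ih =>
    intro u A
    by_cases hcu : c ∈ u
    · have h1 : PySem.Set.add u c = u := pv_add_of_mem hcu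
      have h2 : PySem.Set.add (PySem.Set.update A u) c = PySem.Set.update A u :=
        pv_add_of_mem ((PySem.Set.mem_update A u c).mpr (Or.inr hcu))
      simp only [PySem.Set.update, List.foldl_cons] at *
      rw [h1, h2]
      exact ih u A
    · have h1 : PySem.Set.add u c = u ++ [c] := by
        simp [PySem.Set.add, hcu]
      simp only [PySem.Set.update, List.foldl_cons]
      rw [h1]
      have := ih (u ++ [c]) A
      simp only [PySem.Set.update] at this ⊢
      rw [this, List.foldl_append]
      rfl

theorem pv_containsK (d : List (String × Int)) (c : String) :
    (pvVocab d).contains c = PySem.Dict.contains ⟨d⟩ c := by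
  rw [Bool.eq_iff_iff]
  simp only [pvVocab, PySem.Dict.contains, PySem.Dict.keys, List.contains_iff_mem,
    PySem.Set.mem_ofList, List.mem_map, List.any_eq_true, beq_iff_eq]

theorem pv_k0 (d : List (String × Int)) (cs : List String) : ∀ (s : List String),
    cs.foldl (pvStep d) s =
      PySem.Set.update s (cs.filter (fun c => !PySem.Dict.contains ⟨d⟩ c)) := by
  induction cs with
  | nil => intro s; rfl
  | cons c cs ih =>
    intro s
    by_cases h : PySem.Dict.contains ⟨d⟩ c = true
    · simp only [List.foldl_cons, List.filter_cons, pvStep, h, if_pos, Bool.not_true,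
        Bool.false_eq_true, if_false]
      exact ih s
    · simp only [Bool.not_eq_true] at h
      simp only [List.foldl_cons, List.filter_cons, pvStep, h, Bool.not_false, if_true,
        Bool.false_eq_true, if_false]
      rw [ih (PySem.Set.add s c)]
      rfl

theorem pv_filter_add_pos {p : String → Bool} {c : String} (s : List String) (hp : p c = true) :
    (PySem.Set.add s c).filter p = PySem.Set.add (s.filter p) c := by
  by_cases hs : c ∈ s
  · simp [PySem.Set.add, hs, hp]
  · simp [PySem.Set.add, hs, hp, List.filter_append]

theorem pv_filter_add_neg {p : String → Bool} {c : String} (s : List String) (hp : p c = false) :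
    (PySem.Set.add s c).filter p = s.filter p := by
  by_cases hs : c ∈ s
  · simp [PySem.Set.add, hs]
  · simp [PySem.Set.add, hs, List.filter_append, hp]

theorem pv_filter_foldl_add (p : String → Bool) (cs : List String) : ∀ (s : List String),
    (cs.foldl PySem.Set.add s).filter p = (cs.filter p).foldl PySem.Set.add (s.filter p) := by
  induction cs with
  | nil => intro s; rfl
  | cons c cs ih =>
    intro s
    by_cases hp : p c = true
    · simp only [List.foldl_cons, List.filter_cons, hp, if_pos]
      rw [ih (PySem.Set.add s c), pv_filter_add_pos s hp]
    · simp only [Bool.not_eq_true] at hp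
      simp only [List.foldl_cons, List.filter_cons, hp, Bool.false_eq_true, if_false]
      rw [ih (PySem.Set.add s c), pv_filter_add_neg s hp]

theorem pv_filter_ofList (p : String → Bool) (cs : List String) :
    (PySem.Set.ofList cs).filter p = PySem.Set.ofList (cs.filter p) := by
  have h := pv_filter_foldl_add p cs []
  simpa [PySem.Set.ofList_eq_foldl] using h

theorem pv_update_disjoint (t : List String) : ∀ (A : List String),
    (∀ x ∈ t, x ∉ A) → t.Nodup → PySem.Set.update A t = A ++ t := by
  induction t with
  | nil => intro A _ _; simp [PySem.Set.update]
  | cons c t ih =>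
    intro A hdis hnd
    simp only [PySem.Set.update, List.foldl_cons]
    have hc : PySem.Set.add A c = A ++ [c] := by
      simp [PySem.Set.add, hdis c (by simp)]
    rw [hc]
    have := ih (A ++ [c]) (by
      intro x hx
      simp only [List.mem_append, List.mem_singleton]
      rintro (h | rfl)
      · exact hdis x (by simp [hx]) h
      · exact (List.nodup_cons.mp hnd).1 hx) (List.nodup_cons.mp hnd).2
    simp only [PySem.Set.update] at this
    rw [this, List.append_assoc]
    rfl

theorem pv_unknown_nodup (lines vocab : List String) (lo hi : Nat) :
    (pvUnknown lines vocab lo hi).Nodup := by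
  induction lo, hi using pvUnknown.induct with
  | case1 lo hi h1 h2 =>
    rw [pvUnknown, if_pos h1, if_pos h2]
    exact PySem.Set.nodup_diff _ _ (PySem.Set.nodup_ofList _)
  | case2 lo hi h1 h2 =>
    rw [pvUnknown, if_pos h1, if_neg h2]
    exact List.nodup_nil
  | case3 lo hi h1 ih1 ih2 =>
    rw [pvUnknown, if_neg h1]
    exact PySem.Set.nodup_union _ _ ih1

theorem pv_outer_flatten (d : List (String × Int)) (ls : List String) : ∀ (s : List String),
    ls.foldl (fun nc line => (pvChars line).foldl (pvStep d) nc) s =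
      ((ls.map pvChars).flatten).foldl (pvStep d) s := by
  induction ls with
  | nil => intro s; rfl
  | cons l ls ih =>
    intro s
    simp only [List.foldl_cons, List.map_cons, List.flatten_cons, List.foldl_append]
    exact ih _

theorem pv_main (lines : List String) (d : List (String × Int)) :
    ∀ (n lo hi : Nat), hi - lo = n → hi ≤ lines.length → ∀ (s : List String),
      ((((lines.drop lo).take (hi - lo)).map pvChars).flatten).foldl (pvStep d) s =
        PySem.Set.update s (pvUnknown lines (pvVocab d) lo hi) := by
  intro n
  induction n using Nat.strong_induction_on with
  | _ n ih =>
    intro lo hi hn hhi s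
    rw [pvUnknown]
    by_cases h1 : hi - lo ≤ 1
    · rw [if_pos h1]
      by_cases h2 : lo < hi
      · rw [if_pos h2]
        have hlo : lo < lines.length := by omega
        have h1' : hi - lo = 1 := by omega
        rw [h1', List.drop_eq_getElem_cons hlo]
        simp only [List.take_succ_cons, List.take_zero, List.map_cons, List.map_nil,
          List.flatten_cons, List.flatten_nil, List.append_nil]
        have hget : lines.getD lo "" = lines[lo] := by
          simp [List.getD, List.getElem?_eq_getElem hlo]
        rw [hget, pv_k0]
        have hpred : (pvChars lines[lo]).filter (fun c => !PySem.Dict.contains ⟨d⟩ c) =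
            (pvChars lines[lo]).filter (fun c => !(pvVocab d).contains c) := by
          apply List.filter_congr
          intro x _
          rw [pv_containsK]
        rw [hpred]
        have hdiff : PySem.Set.diff (PySem.Set.ofList (pvChars lines[lo])) (pvVocab d) =
            PySem.Set.ofList ((pvChars lines[lo]).filter (fun c => !(pvVocab d).contains c)) := by
          rw [← pv_filter_ofList]
          simp [PySem.Set.diff, PySem.Set.contains]
        rw [hdiff]
        -- update s (ofList z) = update s z via pv_gen with u := []
        have := pv_gen ((pvChars lines[lo]).filter (fun c => !(pvVocab d).contains c)) [] s
        simpa [PySem.Set.update, PySem.Set.ofList_eq_foldl] using this.symm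
      · rw [if_neg h2]
        have h0 : hi - lo = 0 := by omega
        rw [h0]
        rfl
    · rw [if_neg h1]
      have hsplit : hi - lo = ((lo + hi) / 2 - lo) + (hi - (lo + hi) / 2) := by omega
      rw [hsplit, List.take_add, List.drop_drop]
      have hmid2 : lo + ((lo + hi) / 2 - lo) = (lo + hi) / 2 := by omega
      rw [hmid2]
      simp only [List.map_append, List.flatten_append, List.foldl_append]
      rw [ih ((lo + hi) / 2 - lo) (by omega) lo ((lo + hi) / 2) rfl (by omega) s]
      rw [ih (hi - (lo + hi) / 2) (by omega) ((lo + hi) / 2) hi rfl hhi _]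
      exact (pv_gen (pvUnknown lines (pvVocab d) ((lo + hi) / 2) hi)
        (pvUnknown lines (pvVocab d) lo ((lo + hi) / 2)) s).symm

-- ===== VERDICT (by name: the statement is the Claim_ definition above) =====
theorem get_new_chars_spec : Claim_equal_get_new_chars := by
  intro lines char2idx _
  unfold Spec_get_new_chars
  have hA : get_new_chars lines char2idx =
      lines.foldl (fun nc line => (pvChars line).foldl (pvStep char2idx) nc) PySem.Set.empty := rfl
  have hB : get_new_chars_alt lines char2idx =
      pvUnknown lines (pvVocab char2idx) 0 lines.length := rfl
  rw [hA, hB, pv_outer_flatten char2idx lines PySem.Set.empty]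
  have hmain := pv_main lines char2idx (lines.length - 0) 0 lines.length rfl (le_refl _)
    PySem.Set.empty
  simp only [Nat.sub_zero, List.drop_zero, List.take_length] at hmain
  rw [hmain]
  have hnd := pv_unknown_nodup lines (pvVocab char2idx) 0 lines.length
  have hupd := pv_update_disjoint (pvUnknown lines (pvVocab char2idx) 0 lines.length) []
    (by intro x _ hx; simp at hx) hnd
  simpa [PySem.Set.update, PySem.Set.empty] using hupd
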